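-- pv_equiv track=rewrite | github.com/itszrong/advent-of-code | 2024/day5/day5_p1.py | get_ordered_list
-- ===== SOURCE A (Python) =====
-- import copy
-- import copy
--
-- def get_ordered_list(graph, page):
--     # Filter the graph to only include nodes present in the page
--     graph_filtered = {}
--     page_set = set(page)
--
--     for key in graph.keys():
--         if key in page_set:
--             # Only include neighbors that are also in the page
--             neighbors = [neighbor for neighbor in graph[key] if neighbor in page_set]
--             if neighbors:  # Only add if there are valid neighbors
--                 graph_filtered[key] = neighbors
--
--     # Now perform topological sort on the filtered graph
--     ordered_list = []
--     graph_copy = copy.deepcopy(graph_filtered)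
--
--     while graph_copy:
--         # Find all values (nodes that have incoming edges)
--         values = set()
--         for neighbors in graph_copy.values():
--             for neighbor in neighbors:
--                 values.add(neighbor)
--
--         # Find nodes with no incoming edges
--         nodes_with_no_incoming = []
--         for key in graph_copy.keys():
--             if key not in values:
--                 nodes_with_no_incoming.append(key)
--
--         # If no nodes with no incoming edges, we have a cycle in the subgraph
--         if not nodes_with_no_incoming:
--             # Just add remaining nodes in any order
--             ordered_list.extend(list(graph_copy.keys()))
--             break
--
--         # Add one node with no incoming edges and remove it from graph
--         node_to_remove = nodes_with_no_incoming[0]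
--         ordered_list.append(node_to_remove)
--         graph_copy.pop(node_to_remove)
--
--     # Add any remaining nodes from the page that weren't in the graph
--     for node in page:
--         if node not in ordered_list:
--             ordered_list.append(node)
--
--     return ordered_list
-- ===== SOURCE B (Python) =====
-- def get_ordered_list(graph, page):
--     # Phase 1: filter the graph to keys/neighbors present in the page
--     page_set = set(page)
--     adj = []
--     for key, nbrs in graph.items():
--         if key in page_set:
--             ns = [n for n in nbrs if n in page_set]
--             if ns:
--                 adj.append((key, ns))
--
--     # Phase 2: Kahn's algorithm with an indegree counter maintained
--     # incrementally (instead of recomputing the incoming-edge set each round);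
--     # ties broken by insertion order, matching the repeated-rescan selection.
--     indeg = {}
--     for _, ns in adj:
--         for n in ns:
--             indeg[n] = indeg.get(n, 0) + 1
--
--     ordered = []
--     remaining = adj
--     while remaining:
--         pick = None
--         for i, (k, _) in enumerate(remaining):
--             if indeg.get(k, 0) == 0:
--                 pick = i
--                 break
--         if pick is None:  # cycle among the remaining nodes
--             ordered.extend(k for k, _ in remaining)
--             break
--         k, ns = remaining.pop(pick)
--         ordered.append(k)
--         for n in ns:
--             indeg[n] = indeg.get(n, 0) - 1
--
--     # Phase 3: append leftover page nodes, deduplicated with a seen-set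
--     seen = set(ordered)
--     for node in page:
--         if node not in seen:
--             ordered.append(node)
--             seen.add(node)
--     return ordered
-- ===== Notes on version B (the rewrite author's own statement) =====
-- stated objective: alternative
-- what changed: Replaces A's per-round recomputation of the whole incoming-edge set (a full pass over all remaining edges every time one node is emitted) with an indegree counter built once and decremented incrementally as nodes are popped, and replaces the final 'node not in ordered_list' list scan with a seen-set.
import Mathlib
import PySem

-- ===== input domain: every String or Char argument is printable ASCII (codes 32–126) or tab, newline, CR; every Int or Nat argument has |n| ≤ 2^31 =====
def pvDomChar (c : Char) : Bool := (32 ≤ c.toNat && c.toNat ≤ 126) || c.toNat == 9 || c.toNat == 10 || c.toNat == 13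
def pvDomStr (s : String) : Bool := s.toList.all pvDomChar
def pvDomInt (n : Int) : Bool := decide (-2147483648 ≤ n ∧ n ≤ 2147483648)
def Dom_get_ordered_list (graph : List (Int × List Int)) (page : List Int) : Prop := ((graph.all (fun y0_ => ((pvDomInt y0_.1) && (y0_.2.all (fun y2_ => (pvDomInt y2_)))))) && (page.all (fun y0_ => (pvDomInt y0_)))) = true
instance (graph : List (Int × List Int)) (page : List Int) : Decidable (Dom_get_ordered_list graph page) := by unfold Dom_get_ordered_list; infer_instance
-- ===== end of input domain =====

-- B replaces A's per-round recomputation of the incoming-edge set with an indegree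
-- counter maintained incrementally, and the final list-membership scan with a seen-set.

-- ===== PORT A =====

-- the filtering loop; graph is a Python dict (unique keys), so every
-- graph_filtered[key] = neighbors assignment stores a fresh key, i.e. appends
def pvFilterA (graph : List (Int × List Int)) (pageSet : PySem.Set Int) : List (Int × List Int) :=
  graph.foldl (fun acc kv =>
    if PySem.Set.contains pageSet kv.1 then
      let ns := kv.2.filter (fun n => PySem.Set.contains pageSet n)
      if ns.isEmpty then acc else acc ++ [(kv.1, ns)]
    else acc) []

-- 'values' set: all nodes with an incoming edge in the remaining graph
def pvValuesA (g : List (Int × List Int)) : PySem.Set Int :=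
  g.foldl (fun s kv => kv.2.foldl (fun s' n => PySem.Set.add s' n) s) PySem.Set.empty

-- the while loop; fuel = g.length always suffices (each round pops a present key)
def pvLoopA : Nat → List (Int × List Int) → List Int
  | 0, _ => []
  | fuel+1, g =>
    if g.isEmpty then [] else
      let values := pvValuesA g
      let zeros := g.foldl (fun acc kv => if !(PySem.Set.contains values kv.1) then acc ++ [kv.1] else acc) []
      match zeros with
      | [] => g.map Prod.fst
      | n :: _ => n :: pvLoopA fuel (g.eraseP (fun kv => kv.1 == n))

def get_ordered_list (graph : List (Int × List Int)) (page : List Int) : List Int :=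
  let pageSet := PySem.Set.ofList page
  let gf := pvFilterA graph pageSet
  let ordered := pvLoopA gf.length gf
  page.foldl (fun acc node => if acc.contains node then acc else acc ++ [node]) ordered

-- ===== PORT B =====

-- phase 1 of Source B is the same filtering loop
def pvFilterB (graph : List (Int × List Int)) (pageSet : PySem.Set Int) : List (Int × List Int) :=
  graph.foldl (fun acc kv =>
    if PySem.Set.contains pageSet kv.1 then
      let ns := kv.2.filter (fun n => PySem.Set.contains pageSet n)
      if ns.isEmpty then acc else acc ++ [(kv.1, ns)]
    else acc) []

-- indeg[n] = indeg.get(n, 0) + 1 over all edges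
def pvIndeg (adj : List (Int × List Int)) : PySem.Dict Int Int :=
  adj.foldl (fun d kv => kv.2.foldl (fun d' n => d'.insert n (d'.getD n 0 + 1)) d) PySem.Dict.empty

-- Kahn loop: scan remaining (insertion order) for the first zero-indegree key,
-- pop it, decrement its neighbours' counters (indeg[n] = indeg.get(n, 0) - 1)
def pvLoopB : Nat → List (Int × List Int) → PySem.Dict Int Int → List Int
  | 0, _, _ => []
  | fuel+1, rem, indeg =>
    if rem.isEmpty then [] else
      match rem.findIdx? (fun kv => indeg.getD kv.1 0 == 0) with
      | none => rem.map Prod.fst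
      | some i =>
        match PySem.List.pop? rem (i : Int) with
        | none => []   -- unreachable: i < rem.length
        | some (kv, rem') =>
          kv.1 :: pvLoopB fuel rem' (kv.2.foldl (fun d n => d.insert n (d.getD n 0 - 1)) indeg)

def get_ordered_list_alt (graph : List (Int × List Int)) (page : List Int) : List Int :=
  let pageSet := PySem.Set.ofList page
  let adj := pvFilterB graph pageSet
  let ordered := pvLoopB adj.length adj (pvIndeg adj)
  (page.foldl (fun (acc : List Int × PySem.Set Int) node =>
      if PySem.Set.contains acc.2 node then acc
      else (acc.1 ++ [node], PySem.Set.add acc.2 node))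
    (ordered, PySem.Set.ofList ordered)).1

-- ===== PRECONDITION & SPEC =====
def Spec_get_ordered_list (graph : List (Int × List Int)) (page : List Int) (out : List Int) : Prop := out = get_ordered_list_alt graph page
instance (graph : List (Int × List Int)) (page : List Int) (out : List Int) : Decidable (Spec_get_ordered_list graph page out) := by unfold Spec_get_ordered_list; infer_instance

-- ===== CLAIM (what is proved, stated in full; the proofs are below) =====
def Claim_equal_get_ordered_list : Prop := ∀ (graph : List (Int × List Int)) (page : List Int), Dom_get_ordered_list graph page → Spec_get_ordered_list graph page (get_ordered_list graph page)

-- ===== LEMMAS AND PROOFS =====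

-- membership in A's recomputed 'values' set = membership in the flattened edge lists
theorem mem_pvValuesA_aux (y : Int) (g : List (Int × List Int)) :
    ∀ s : PySem.Set Int,
      (y ∈ g.foldl (fun s kv => kv.2.foldl (fun s' n => PySem.Set.add s' n) s) s
        ↔ y ∈ s ∨ y ∈ g.flatMap (fun kv => kv.2)) := by
  induction g with
  | nil => intro s; simp
  | cons kv g ih =>
    intro s
    simp only [List.foldl_cons, ih, List.flatMap_cons, List.mem_append]
    rw [PySem.Set.mem_foldl_add (f := fun (n : Int) => n)]
    simp
    tauto

theorem mem_pvValuesA (y : Int) (g : List (Int × List Int)) :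
    y ∈ pvValuesA g ↔ y ∈ g.flatMap (fun kv => kv.2) := by
  rw [pvValuesA, mem_pvValuesA_aux]
  simp [PySem.Set.empty]

-- the counter built by pvIndeg holds exactly the occurrence counts
theorem getD_indeg_aux (k : Int) (g : List (Int × List Int)) :
    ∀ d : PySem.Dict Int Int,
      (g.foldl (fun d kv => kv.2.foldl (fun d' n => d'.insert n (d'.getD n 0 + 1)) d) d).getD k 0
        = d.getD k 0 + ((g.flatMap (fun kv => kv.2)).count k : Int) := by
  induction g with
  | nil => intro d; simp
  | cons kv g ih =>
    intro d
    simp only [List.foldl_cons, ih, PySem.Dict.getD_foldl_insert_add_one,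
      List.flatMap_cons, List.count_append]
    push_cast
    ring

theorem indeg_spec (adj : List (Int × List Int)) (k : Int) :
    (pvIndeg adj).getD k 0 = ((adj.flatMap (fun kv => kv.2)).count k : Int) := by
  rw [pvIndeg, getD_indeg_aux]
  simp

-- the decrement loop subtracts the occurrence count
theorem getD_dec (k : Int) (ns : List Int) :
    ∀ d : PySem.Dict Int Int,
      (ns.foldl (fun d n => d.insert n (d.getD n 0 - 1)) d).getD k 0
        = d.getD k 0 - (ns.count k : Int) := by
  induction ns with
  | nil => intro d; simp
  | cons n ns ih =>
    intro d
    simp only [List.foldl_cons, ih, PySem.Dict.getD_insert, List.count_cons]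
    by_cases h : k = n
    · subst h
      simp
      ring
    · simp [h]
      omega

-- first-hit characterisation of filter
theorem filter_eq_cons_of_first {α : Type} (p : α → Bool) (g : List α) (i : Nat)
    (hi : i < g.length) (hpi : p (g[i]) = true)
    (hbefore : ∀ j (hj : j < i), p (g[j]'(by omega)) = false) :
    g.filter p = g[i] :: (g.drop (i+1)).filter p := by
  conv_lhs => rw [show g = g.take i ++ g[i] :: g.drop (i+1) by
    rw [List.getElem_cons_drop, List.take_append_drop]]
  rw [List.filter_append, List.filter_cons_of_pos hpi]
  have h0 : List.filter p (List.take i g) = [] := by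
    rw [List.filter_eq_nil_iff]
    intro a ha
    rw [Bool.not_eq_true]
    obtain ⟨j, hj, hja⟩ := List.mem_take_iff_getElem.1 ha
    have hji : j < i := lt_of_lt_of_le hj (min_le_left _ _)
    rw [← hja]
    exact hbefore j hji
  simp [h0]

-- erasing the found key = erasing at the found index (the predicate only reads the key)
theorem eraseP_idx (d : PySem.Dict Int Int) :
    ∀ (g : List (Int × List Int)) (i : Nat) (hi : i < g.length),
      (d.getD (g[i]).1 0 == 0) = true →
      (∀ j (hj : j < i), (d.getD ((g[j]'(by omega)).1) 0 == 0) = false) →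
      g.eraseP (fun kv => kv.1 == (g[i]).1) = g.eraseIdx i := by
  intro g
  induction g with
  | nil => intro i hi; simp at hi
  | cons a g ih =>
    intro i hi hqi hbefore
    cases i with
    | zero =>
      simp only [List.getElem_cons_zero] at hqi ⊢
      simp
    | succ i =>
      have h0 : (d.getD a.1 0 == 0) = false := hbefore 0 (Nat.succ_pos i)
      simp only [List.getElem_cons_succ] at hqi ⊢
      have hne : ¬ ((a.1 == (g[i]'(by simpa using hi)).1) = true) := by
        rw [beq_iff_eq]
        intro hc
        rw [beq_eq_false_iff_ne] at h0
        rw [beq_iff_eq] at hqi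
        rw [hc] at h0
        exact h0 hqi
      have hne' : (a.1 == (g[i]'(by simpa using hi)).1) = false := by
        rw [Bool.eq_false_iff]
        exact hne
      rw [List.eraseP_cons, List.eraseIdx_cons_succ, hne']
      simp only [cond_false]
      congr 1
      exact ih i (by simpa using hi) hqi (fun j hj => hbefore (j+1) (by omega))

-- the two loops agree whenever the counter matches the remaining occurrence counts
theorem main_loop_eq (fuel : Nat) :
    ∀ (g : List (Int × List Int)) (indeg : PySem.Dict Int Int),
      (∀ kv ∈ g, indeg.getD kv.1 0 = (((g.flatMap (fun kv => kv.2)).count kv.1 : Nat) : Int)) →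
      pvLoopA fuel g = pvLoopB fuel g indeg := by
  induction fuel with
  | zero => intro g indeg _; rfl
  | succ fuel ih =>
    intro g indeg hinv
    simp only [pvLoopA, pvLoopB]
    by_cases hg : g.isEmpty = true
    · rw [if_pos hg, if_pos hg]
    · rw [if_neg hg, if_neg hg]
      have agree : ∀ a ∈ g,
          (!(PySem.Set.contains (pvValuesA g) a.1)) = (indeg.getD a.1 0 == 0) := by
        intro a ha
        have h2 := hinv a ha
        by_cases hm : a.1 ∈ g.flatMap (fun kv => kv.2)
        · have hc : PySem.Set.contains (pvValuesA g) a.1 = true :=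
            (PySem.Set.contains_iff _ _).2 ((mem_pvValuesA _ _).2 hm)
          have hcnt : (g.flatMap (fun kv => kv.2)).count a.1 ≠ 0 := by
            rw [Ne, List.count_eq_zero]
            intro h
            exact h hm
          have hz : (indeg.getD a.1 0 == 0) = false := by
            rw [beq_eq_false_iff_ne, Ne, h2]
            exact_mod_cast hcnt
          rw [hc, hz]
          rfl
        · have hc : PySem.Set.contains (pvValuesA g) a.1 = false := by
            rw [Bool.eq_false_iff, Ne]
            intro h
            exact hm ((mem_pvValuesA _ _).1 ((PySem.Set.contains_iff _ _).1 h))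
          have hcnt : (g.flatMap (fun kv => kv.2)).count a.1 = 0 :=
            List.count_eq_zero.2 hm
          have hz : (indeg.getD a.1 0 == 0) = true := by
            rw [beq_iff_eq, h2, hcnt]
            rfl
          rw [hc, hz]
          rfl
      rw [PySem.List.foldl_append_if
        (p := fun kv : Int × List Int => !(PySem.Set.contains (pvValuesA g) kv.1))
        (f := Prod.fst)]
      rw [List.nil_append, List.filter_congr agree]
      cases hfind : g.findIdx? (fun kv => indeg.getD kv.1 0 == 0) with
      | none =>
        have hall := List.findIdx?_eq_none_iff.1 hfind
        have hnil : g.filter (fun kv => indeg.getD kv.1 0 == 0) = [] := by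
          rw [List.filter_eq_nil_iff]
          intro a ha
          rw [Bool.not_eq_true]
          exact hall a ha
        rw [hnil]
        rfl
      | some i =>
        obtain ⟨hi, hqi, hlt⟩ := List.findIdx?_eq_some_iff_getElem.1 hfind
        have hbefore : ∀ j (hj : j < i),
            (indeg.getD ((g[j]'(by omega)).1) 0 == 0) = false := by
          intro j hj
          have := hlt j hj
          simpa using this
        rw [filter_eq_cons_of_first (fun kv : Int × List Int => indeg.getD kv.1 0 == 0)
          g i hi hqi hbefore]
        have hpop := PySem.List.pop?_natCast g i hi
        simp only [List.map_cons, hpop]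
        rw [eraseP_idx indeg g i hi hqi hbefore]
        congr 1
        apply ih
        intro kv hkv
        rw [getD_dec]
        rw [hinv kv (List.mem_of_mem_eraseIdx hkv)]
        have hsplit : g.flatMap (fun kv => kv.2)
            = (g.take i).flatMap (fun kv => kv.2)
              ++ ((g[i]).2 ++ (g.drop (i+1)).flatMap (fun kv => kv.2)) := by
          conv_lhs => rw [show g = g.take i ++ g[i] :: g.drop (i+1) by
            rw [List.getElem_cons_drop, List.take_append_drop]]
          simp only [List.flatMap_append, List.flatMap_cons]
        rw [List.eraseIdx_eq_take_drop_succ, List.flatMap_append, hsplit]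
        simp only [List.count_append]
        push_cast
        ring

-- the seen-set final pass = A's list-membership final pass
theorem tail_eq (page : List Int) :
    ∀ (acc : List Int) (s : PySem.Set Int),
      (∀ x, x ∈ s ↔ x ∈ acc) →
      (page.foldl (fun (a : List Int × PySem.Set Int) node =>
          if PySem.Set.contains a.2 node then a
          else (a.1 ++ [node], PySem.Set.add a.2 node)) (acc, s)).1
        = page.foldl (fun a node => if a.contains node then a else a ++ [node]) acc := by
  induction page with
  | nil => intro acc s _; rfl
  | cons node page ih =>
    intro acc s hs
    simp only [List.foldl_cons]
    by_cases hm : node ∈ acc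
    · have h1 : PySem.Set.contains s node = true := (PySem.Set.contains_iff _ _).2 ((hs node).2 hm)
      have h2 : acc.contains node = true := by rw [List.contains_iff_mem]; exact hm
      simp only [h1, h2, if_true]
      exact ih acc s hs
    · have h1 : PySem.Set.contains s node = false := by
        rw [Bool.eq_false_iff, Ne]
        intro h
        exact hm ((hs node).1 ((PySem.Set.contains_iff _ _).1 h))
      have h2 : acc.contains node = false := by
        rw [Bool.eq_false_iff, Ne, List.contains_iff_mem]; exact hm
      simp only [h1, h2, Bool.false_eq_true, if_false]
      apply ih
      intro x
      rw [PySem.Set.mem_add]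
      simp only [List.mem_append, List.mem_singleton]
      rw [hs x]

-- ===== VERDICT (by name: the statement is the Claim_ definition above) =====
theorem get_ordered_list_spec : Claim_equal_get_ordered_list := by
  intro graph page _
  unfold Spec_get_ordered_list get_ordered_list get_ordered_list_alt
  dsimp only
  rw [show pvFilterA = pvFilterB from rfl]
  rw [main_loop_eq _ _ (pvIndeg (pvFilterB graph (PySem.Set.ofList page)))
    (fun kv _ => by rw [indeg_spec])]
  rw [tail_eq]
  intro x
  simp [PySem.Set.mem_ofList]
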